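-- pv_equiv track=rewrite | github.com/bheuvel/aws-cnf-attributes-macro | cnf_attributes_macro/app.py | set_tag
-- ===== SOURCE A (Python) =====
-- def set_tag(tags, key, value, overwrite=False):
--     entry_found = False
--     for entry in tags:
--         if entry['Key'] == key:
--             entry_found = True
--             if overwrite:
--                 entry['Value'] = value
--     if not entry_found:
--         tags += [{'Key': key, 'Value': value}]
--     return tags
-- ===== SOURCE B (Python) =====
-- def set_tag(tags, key, value, overwrite=False):
--     # Build a key -> list-of-positions index once, then act on the index.
--     index = {}
--     for i, e in enumerate(tags):
--         index.setdefault(e['Key'], []).append(i)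
--     hits = index.get(key, [])
--     if overwrite:
--         for i in hits:
--             tags[i]['Value'] = value
--     if not hits:
--         tags.append({'Key': key, 'Value': value})
--     return tags
-- ===== Notes on version B (the rewrite author's own statement) =====
-- stated objective: alternative
-- what changed: Replaces the interleaved scan-with-flag by building a key->positions hash index of the whole list once, then overwriting by index lookup and appending iff the index has no entry for the key.
import Mathlib
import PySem

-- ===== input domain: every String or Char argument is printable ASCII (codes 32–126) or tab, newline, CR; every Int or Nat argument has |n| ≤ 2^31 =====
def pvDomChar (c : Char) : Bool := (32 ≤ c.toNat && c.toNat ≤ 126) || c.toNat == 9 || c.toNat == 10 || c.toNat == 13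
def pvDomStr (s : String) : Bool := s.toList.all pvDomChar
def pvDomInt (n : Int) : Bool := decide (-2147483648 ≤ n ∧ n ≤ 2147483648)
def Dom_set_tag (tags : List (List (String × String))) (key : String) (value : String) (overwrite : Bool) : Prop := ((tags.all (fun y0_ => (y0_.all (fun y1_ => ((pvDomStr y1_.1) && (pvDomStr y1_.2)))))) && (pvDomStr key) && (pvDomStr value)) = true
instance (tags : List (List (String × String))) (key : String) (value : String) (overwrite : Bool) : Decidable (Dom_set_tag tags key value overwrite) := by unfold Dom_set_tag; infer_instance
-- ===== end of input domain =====

-- ===== PORT A =====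
-- Both A and B mutate `tags` in place (entry updates / append); the equivalence proved here is
-- about the RETURN value. B builds a key->positions index once, then acts on the index.
def dget (e : List (String × String)) (k : String) : Option String :=
  (PySem.Dict.mk e).get? k

def dset (e : List (String × String)) (k v : String) : List (String × String) :=
  ((PySem.Dict.mk e).insert k v).items

def keyMatches (key : String) (e : List (String × String)) : Bool :=
  dget e "Key" == some key

def set_tag (tags : List (List (String × String))) (key : String) (value : String) (overwrite : Bool) : List (List (String × String)) :=
  let r := tags.foldl
    (fun (st : Bool × List (List (String × String))) entry =>
      if keyMatches key entry then
        (true, st.2 ++ [if overwrite then dset entry "Value" value else entry])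
      else
        (st.1, st.2 ++ [entry]))
    (false, [])
  if r.1 then r.2 else r.2 ++ [[("Key", key), ("Value", value)]]

-- ===== PORT B =====
-- index = {}; for i, e in enumerate(tags): index.setdefault(e['Key'], []).append(i)
-- (`none` branch: there Python raises KeyError on e['Key']; such inputs are outside Pre_.
--  Python's indices are the nonnegative ints of enumerate, so tags[i] is List.modify i.toNat.)
def set_tag_alt (tags : List (List (String × String))) (key : String) (value : String) (overwrite : Bool) : List (List (String × String)) :=
  let index : PySem.Dict String (List Int) :=
    (PySem.List.enumerate tags).foldl
      (fun d p =>
        match dget p.2 "Key" with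
        | some k => d.insert k (d.getD k [] ++ [p.1])
        | none => d)
      (PySem.Dict.mk [])
  let hits := index.getD key []
  let tags' := if overwrite then
      hits.foldl (fun t i => t.modify i.toNat (fun e => dset e "Value" value)) tags
    else tags
  if hits.isEmpty then tags' ++ [[("Key", key), ("Value", value)]] else tags'

-- ===== PRECONDITION & SPEC =====
-- Pre_: every entry dict has a "Key" key; on any other input Python A raises KeyError.
def Pre_set_tag (tags : List (List (String × String))) (key : String) (value : String) (overwrite : Bool) : Prop :=
  ∀ e ∈ tags, "Key" ∈ e.map Prod.fst
instance (tags : List (List (String × String))) (key : String) (value : String) (overwrite : Bool) : Decidable (Pre_set_tag tags key value overwrite) := by unfold Pre_set_tag; infer_instance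
def pvWitness_set_tag : (List (List (String × String))) × String × String × Bool :=
  ([[("Key", "a"), ("Value", "1")]], "a", "2", true)
def Spec_set_tag (tags : List (List (String × String))) (key : String) (value : String) (overwrite : Bool) (out : List (List (String × String))) : Prop := out = set_tag_alt tags key value overwrite
instance (tags : List (List (String × String))) (key : String) (value : String) (overwrite : Bool) (out : List (List (String × String))) : Decidable (Spec_set_tag tags key value overwrite out) := by unfold Spec_set_tag; infer_instance

-- ===== CLAIM (what is proved, stated in full; the proofs are below) =====
def Claim_equal_set_tag : Prop := ∀ (tags : List (List (String × String))) (key : String) (value : String) (overwrite : Bool), Dom_set_tag tags key value overwrite → Pre_set_tag tags key value overwrite → Spec_set_tag tags key value overwrite (set_tag tags key value overwrite)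

-- ===== LEMMAS AND PROOFS =====
-- positions (Python ints, all nonnegative) of the entries whose 'Key' equals key
def matchPos (key : String) : List (List (String × String)) → List Int
  | [] => []
  | e :: es => if keyMatches key e then 0 :: (matchPos key es).map (· + 1)
               else (matchPos key es).map (· + 1)

lemma set_tag_fold (key value : String) (overwrite : Bool)
    (tags : List (List (String × String))) (f : Bool) (acc : List (List (String × String))) :
    tags.foldl
      (fun (st : Bool × List (List (String × String))) entry =>
        if keyMatches key entry then
          (true, st.2 ++ [if overwrite then dset entry "Value" value else entry])
        else
          (st.1, st.2 ++ [entry]))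
      (f, acc)
    = (f || tags.any (keyMatches key),
       acc ++ tags.map (fun e =>
         if keyMatches key e then (if overwrite then dset e "Value" value else e) else e)) := by
  induction tags generalizing f acc with
  | nil => simp
  | cons e es ih =>
    by_cases h : keyMatches key e <;> simp [h, ih]

lemma index_fold (key : String) (tags : List (List (String × String)))
    (n : Int) (d : PySem.Dict String (List Int)) :
    ((PySem.List.enumerate tags n).foldl
      (fun d p =>
        match dget p.2 "Key" with
        | some k => d.insert k (d.getD k [] ++ [p.1])
        | none => d)
      d).getD key []
    = d.getD key [] ++ (matchPos key tags).map (fun j => n + j) := by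
  induction tags generalizing n d with
  | nil => simp [matchPos]
  | cons e es ih =>
    rw [PySem.List.enumerate_cons]
    simp only [List.foldl_cons]
    cases hk : dget e "Key" with
    | none =>
      have hm : keyMatches key e = false := by simp [keyMatches, hk]
      simp only [ih, matchPos, hm, Bool.false_eq_true, if_false, List.map_map]
      congr 1
      apply List.map_congr_left
      intro j _
      simp only [Function.comp_apply]
      ring
    | some k =>
      simp only [ih, PySem.Dict.getD_insert]
      by_cases hkk : key = k
      · subst hkk
        have hm : keyMatches key e = true := by simp [keyMatches, hk]
        simp only [matchPos, hm, if_true, List.map_cons, List.map_map,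
          List.append_assoc, List.singleton_append]
        congr 2
        · ring
        · apply List.map_congr_left
          intro j _
          simp only [Function.comp_apply]
          ring
      · have hm : keyMatches key e = false := by
          have : (k == key) = false := by
            exact beq_eq_false_iff_ne.mpr (fun h => hkk h.symm)
          simp [keyMatches, hk, this]
        simp only [if_neg hkk, matchPos, hm, Bool.false_eq_true, if_false, List.map_map]
        congr 1
        apply List.map_congr_left
        intro j _
        simp only [Function.comp_apply]
        ring

lemma matchPos_nonneg (key : String) (tags : List (List (String × String))) :
    ∀ i ∈ matchPos key tags, 0 ≤ i := by
  induction tags with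
  | nil => simp [matchPos]
  | cons e es ih =>
    intro i hi
    by_cases h : keyMatches key e
    · simp only [matchPos, h, if_true, List.mem_cons, List.mem_map] at hi
      rcases hi with rfl | ⟨j, hj, rfl⟩
      · exact le_refl 0
      · have := ih j hj; omega
    · simp only [matchPos, h, Bool.false_eq_true, if_false, List.mem_map] at hi
      rcases hi with ⟨j, hj, rfl⟩
      have := ih j hj; omega

lemma fold_modify_shift (f : List (String × String) → List (String × String))
    (is : List Int) (hnn : ∀ i ∈ is, 0 ≤ i)
    (e : List (String × String)) (es : List (List (String × String))) :
    ((is.map (· + 1)).foldl (fun t i => t.modify i.toNat f) (e :: es))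
    = e :: is.foldl (fun t i => t.modify i.toNat f) es := by
  induction is generalizing es with
  | nil => simp
  | cons i is' ih =>
    have hi : 0 ≤ i := hnn i (List.mem_cons_self)
    have ht : (i + 1).toNat = i.toNat + 1 := by omega
    simp only [List.map_cons, List.foldl_cons, List.modify_cons, ht, Nat.add_one_ne_zero,
      if_false, Nat.add_sub_cancel]
    exact ih (fun j hj => hnn j (List.mem_cons_of_mem _ hj)) _

lemma fold_modify (key : String) (f : List (String × String) → List (String × String))
    (tags : List (List (String × String))) :
    (matchPos key tags).foldl (fun t i => t.modify i.toNat f) tags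
    = tags.map (fun e => if keyMatches key e then f e else e) := by
  induction tags with
  | nil => simp [matchPos]
  | cons e es ih =>
    by_cases h : keyMatches key e
    · simp only [matchPos, h, if_true, List.foldl_cons, Int.toNat_zero, List.modify_cons,
        fold_modify_shift f _ (matchPos_nonneg key es), ih, List.map_cons]
    · simp only [matchPos, h, Bool.false_eq_true, if_false,
        fold_modify_shift f _ (matchPos_nonneg key es), ih, List.map_cons]

lemma isEmpty_map {α β : Type} (f : α → β) (l : List α) :
    (l.map f).isEmpty = l.isEmpty := by
  cases l <;> simp

lemma matchPos_isEmpty (key : String) (tags : List (List (String × String))) :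
    (matchPos key tags).isEmpty = !(tags.any (keyMatches key)) := by
  induction tags with
  | nil => simp [matchPos]
  | cons e es ih =>
    by_cases h : keyMatches key e
    · simp [matchPos, h]
    · simpa [matchPos, h, isEmpty_map] using ih

-- ===== VERDICT (by name: the statement is the Claim_ definition above) =====
theorem set_tag_spec : Claim_equal_set_tag := by
  intro tags key value overwrite _ _
  unfold Spec_set_tag set_tag set_tag_alt
  rw [set_tag_fold]
  have hhits : ((PySem.List.enumerate tags).foldl
      (fun d p =>
        match dget p.2 "Key" with
        | some k => d.insert k (d.getD k [] ++ [p.1])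
        | none => d)
      (PySem.Dict.mk [])).getD key []
      = matchPos key tags := by
    rw [index_fold]
    simp [PySem.Dict.getD, PySem.Dict.get?]
  simp only [hhits, fold_modify, matchPos_isEmpty, List.nil_append]
  by_cases h : tags.any (keyMatches key)
  · simp only [h, Bool.false_or, Bool.not_true, Bool.false_eq_true, if_false, if_true]
    cases overwrite with
    | true => simp
    | false => simp
  · have hb : tags.any (keyMatches key) = false := by simpa using h
    have hm : ∀ e ∈ tags, ¬ (keyMatches key e = true) := by
      simpa [List.any_eq_true] using h
    have hid : tags.map (fun e =>
        if keyMatches key e then (if overwrite then dset e "Value" value else e) else e)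
        = tags := by
      rw [List.map_congr_left (g := id) (fun e he => by simp [hm e he]), List.map_id]
    have hid2 : tags.map (fun e =>
        if keyMatches key e then dset e "Value" value else e) = tags := by
      rw [List.map_congr_left (g := id) (fun e he => by simp [hm e he]), List.map_id]
    simp only [hb, Bool.false_or, Bool.false_eq_true, if_false, Bool.not_false, if_true, hid]
    cases overwrite with
    | true => simp [hid2]
    | false => simp
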